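-- pv_equiv track=rewrite | github.com/HydroKirby/FKGProcessing | IDlookup.py | split_and_check_count
-- ===== SOURCE A (Python) =====
-- def split_and_check_count(data_entry_csv, expected_count):
-- 	"""Splits a line of CSV and verifies the number of entries is correct.
--
-- 	data_entry_csv is a string of CSV data.
-- 	expected_count is an int saying how many entries to expect.
--
-- 	Returns a tuple: (entries, success, actual_count) such that "entries" is
-- 		all of the CSV data turned into a list of strings, "success" says
-- 		whether or not the expected_count was the number of actual CSV entries,
-- 		and "actual_count" is the actual number of CSV entries.
-- 	The returned "entries" is guaranteed to be the same size as expected_count.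
-- 	If the actual count = the expected count,
-- 		the CSV are returned along with success = True.
-- 	If the actual count < the expected count,
-- 		the available CSV are returned and the parts that were unavailable
-- 		become empty strings. success = False.
-- 	If the actual count > the expected count,
-- 		as many CSV as can fit into "entries" will be returned. succss = False.
--
-- 	Returns (entries, success, actual_count)
-- 	"""
--
-- 	data_entry_csv = data_entry_csv.rstrip()
-- 	entries = data_entry_csv.split(',')
-- 	if data_entry_csv.endswith(','):
-- 		# The last data entry is empty and unnecessary.
-- 		entries = entries[:-1]
--
-- 	actual_count = len(entries)
-- 	if actual_count < expected_count:
-- 		# Add empty strings to fill in the blanks.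
-- 		entries += ['' for i in range(expected_count - actual_count)]
-- 	elif actual_count > expected_count:
-- 		# Crop off the excess entries.
-- 		entries = entries[:expected_count]
--
-- 	return (entries, expected_count == actual_count, actual_count)
-- ===== SOURCE B (Python) =====
-- def split_and_check_count(data_entry_csv, expected_count):
--     s = data_entry_csv.rstrip()
--     # Single left-to-right character scan that builds the fields by hand.
--     fields = []
--     cur = []
--     for ch in s:
--         if ch == ',':
--             fields.append(''.join(cur))
--             cur = []
--         else:
--             cur.append(ch)
--     # A trailing comma means the final (empty) field is unnecessary; otherwise
--     # the characters gathered since the last comma form the last field.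
--     if not s.endswith(','):
--         fields.append(''.join(cur))
--     actual_count = len(fields)
--     # Build the fixed-size output by index instead of padding/cropping.
--     entries = [fields[i] if i < actual_count else '' for i in range(expected_count)]
--     return (entries, expected_count == actual_count, actual_count)
-- ===== Notes on version B (the rewrite author's own statement) =====
-- stated objective: alternative
-- what changed: Replaced str.split plus list slicing/padding with a single hand-rolled character scan that builds the fields, and an index-based list comprehension that assembles the fixed-size output.
-- outside the precondition, e.g. on split_and_check_count('a,b', -1): A returns (['a'], False, 2), B returns ([], False, 2)
import Mathlib
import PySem

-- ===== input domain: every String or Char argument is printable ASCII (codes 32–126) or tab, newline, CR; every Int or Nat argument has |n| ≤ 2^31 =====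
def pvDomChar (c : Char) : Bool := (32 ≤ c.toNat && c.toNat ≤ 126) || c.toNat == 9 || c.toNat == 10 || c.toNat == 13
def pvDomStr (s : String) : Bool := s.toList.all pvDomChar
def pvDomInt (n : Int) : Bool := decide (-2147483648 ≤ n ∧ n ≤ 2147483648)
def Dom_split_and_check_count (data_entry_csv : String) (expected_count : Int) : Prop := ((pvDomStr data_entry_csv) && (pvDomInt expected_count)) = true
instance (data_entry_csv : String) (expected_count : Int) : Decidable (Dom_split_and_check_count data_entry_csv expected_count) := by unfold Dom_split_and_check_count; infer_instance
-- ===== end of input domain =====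

-- B replaces A's split-then-pad/crop staging with a single hand-rolled character scan that
-- builds the fields, followed by an index-based construction of the fixed-size output (alternative decomposition, same cost).

-- ===== PORT A =====
def split_and_check_count (data_entry_csv : String) (expected_count : Int) : List String × Bool × Int :=
  let d := PySem.Str.rstrip data_entry_csv
  let entries := (PySem.Str.split? d ",").getD []  -- sep "," is nonempty, so split? is always some (exact)
  let entries := if PySem.Str.endswith d "," then PySem.List.slice entries none (some (-1)) else entries
  let actual_count : Int := entries.length
  let entries :=
    if actual_count < expected_count then
      entries ++ (PySem.List.pyRange 0 (expected_count - actual_count) 1).map (fun _ => "")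
    else if actual_count > expected_count then
      PySem.List.slice entries none (some expected_count)
    else entries
  (entries, decide (expected_count = actual_count), actual_count)

-- ===== PORT B =====
def split_and_check_count_alt (data_entry_csv : String) (expected_count : Int) : List String × Bool × Int :=
  let s := PySem.Str.rstrip data_entry_csv
  -- single left-to-right character scan building (fields, cur)
  let st := s.toList.foldl
    (fun (st : List String × List Char) ch =>
      if ch = ',' then (st.1 ++ [String.ofList st.2], []) else (st.1, st.2 ++ [ch]))
    ([], [])
  let fields := if PySem.Str.endswith s "," then st.1 else st.1 ++ [String.ofList st.2]
  let actual_count : Int := fields.length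
  -- [fields[i] if i < actual_count else '' for i in range(expected_count)]
  -- fields[i] is in range whenever i < actual_count, so pyGetD with default "" is exact here
  let entries := (PySem.List.pyRange 0 expected_count 1).map
    (fun i => if i < actual_count then PySem.List.pyGetD fields i "" else "")
  (entries, decide (expected_count = actual_count), actual_count)

-- ===== PRECONDITION & SPEC =====
-- Pre_ restricts to the natural domain of a nonnegative expected entry count: for a negative
-- expected_count (a senseless request) A's crop slice entries[:expected_count] counts from the
-- END of the list, a Python-slice artefact, while B naturally returns no entries.
def Pre_split_and_check_count (_data_entry_csv : String) (expected_count : Int) : Prop :=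
  0 ≤ expected_count
instance (data_entry_csv : String) (expected_count : Int) : Decidable (Pre_split_and_check_count data_entry_csv expected_count) := by unfold Pre_split_and_check_count; infer_instance
def pvWitness_split_and_check_count : String × Int := ("a,b", 2)

def Spec_split_and_check_count (data_entry_csv : String) (expected_count : Int) (out : List String × Bool × Int) : Prop := out = split_and_check_count_alt data_entry_csv expected_count
instance (data_entry_csv : String) (expected_count : Int) (out : List String × Bool × Int) : Decidable (Spec_split_and_check_count data_entry_csv expected_count out) := by unfold Spec_split_and_check_count; infer_instance

-- ===== CLAIM (what is proved, stated in full; the proofs are below) =====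
def Claim_equal_split_and_check_count : Prop := ∀ (data_entry_csv : String) (expected_count : Int), Dom_split_and_check_count data_entry_csv expected_count → Pre_split_and_check_count data_entry_csv expected_count → Spec_split_and_check_count data_entry_csv expected_count (split_and_check_count data_entry_csv expected_count)

-- ===== LEMMAS AND PROOFS =====

-- reference single-char-separator split, structural on the string
def mySplit : List Char → List (List Char)
  | [] => [[]]
  | c :: rest => if c = ',' then [] :: mySplit rest else (mySplit rest).modifyHead (c :: ·)

theorem splitOn_go_comma (fuel : Nat) : ∀ (l cur : List Char) (acc : List (List Char)),
    l.length ≤ fuel →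
    PySem.Chars.splitOn.go [','] fuel l cur acc
      = acc.reverse ++ (mySplit l).modifyHead (cur.reverse ++ ·) := by
  induction fuel with
  | zero =>
    intro l cur acc h
    have : l = [] := List.eq_nil_of_length_eq_zero (by omega)
    subst this
    rw [PySem.Chars.splitOn.go.eq_def]
    simp [mySplit]
  | succ f ih =>
    intro l cur acc h
    cases l with
    | nil =>
      rw [PySem.Chars.splitOn.go.eq_def]
      simp [mySplit]
    | cons c rest =>
      rw [PySem.Chars.splitOn.go.eq_def]
      simp only [List.isPrefixOf, Bool.and_true, beq_iff_eq]
      by_cases hc : c = ','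
      · subst hc
        simp only [if_pos trivial, List.length_singleton, List.drop_one, List.tail_cons]
        rw [ih rest [] _ (by simpa using h)]
        simp only [mySplit, List.reverse_nil, List.nil_append, List.modifyHead]
        cases hms : mySplit rest with
        | nil => simp
        | cons a t => simp
      · rw [if_neg (by simp [Ne.symm hc]), ih rest (c :: cur) acc (by simpa using h)]
        simp only [mySplit, if_neg hc, List.modifyHead_modifyHead]
        congr 1
        cases mySplit rest with
        | nil => rfl
        | cons a t => simp

theorem splitOn_comma (l : List Char) :
    PySem.Chars.splitOn l [','] = mySplit l := by
  unfold PySem.Chars.splitOn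
  rw [splitOn_go_comma _ l [] [] (by omega)]
  cases mySplit l with
  | nil => rfl
  | cons a t => simp

-- the scan's accumulated state, related to mySplit
theorem foldl_scan (l : List Char) : ∀ (fs : List String) (cur : List Char),
    (List.foldl (fun (st : List String × List Char) ch =>
        if ch = ',' then (st.1 ++ [String.ofList st.2], []) else (st.1, st.2 ++ [ch])) (fs, cur) l).1
      ++ [String.ofList (List.foldl (fun (st : List String × List Char) ch =>
        if ch = ',' then (st.1 ++ [String.ofList st.2], []) else (st.1, st.2 ++ [ch])) (fs, cur) l).2]
    = fs ++ ((mySplit l).modifyHead (cur ++ ·)).map String.ofList := by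
  induction l with
  | nil => intro fs cur; simp [mySplit]
  | cons c rest ih =>
    intro fs cur
    by_cases hc : c = ','
    · subst hc
      simp only [List.foldl_cons, if_pos trivial]
      rw [ih]
      simp only [mySplit]
      cases hms : mySplit rest with
      | nil => simp
      | cons a t => simp
    · simp only [List.foldl_cons, if_neg hc]
      rw [ih]
      simp only [mySplit, if_neg hc, List.modifyHead_modifyHead]
      have hf : ((fun x => cur ++ x) ∘ fun x => c :: x) = (fun x => cur ++ [c] ++ x) := by
        funext x; simp
      rw [hf]

-- the fixed-size output: both adjustments equal take-then-pad
theorem range_getD (l : List String) (n : Nat) :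
    (List.range n).map (fun k => l.getD k "") = l.take n ++ List.replicate (n - l.length) "" := by
  apply List.ext_getElem
  · simp; omega
  · intro i hi1 hi2
    simp only [List.length_map, List.length_range] at hi1
    simp only [List.getElem_map, List.getElem_range]
    by_cases h : i < l.length
    · rw [List.getElem_append_left (by simp; omega)]
      simp [List.getElem_take, List.getD, List.getElem?_eq_getElem h]
    · rw [List.getElem_append_right (by simp; omega)]
      simp [List.getD, List.getElem?_eq_none (by omega : l.length ≤ i)]

-- both adjustments of the field list to the expected size agree (for 0 ≤ ec)
theorem adjust_eq (L : List String) (ec : Int) (h : 0 ≤ ec) :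
    (if (L.length : Int) < ec then L ++ (PySem.List.pyRange 0 (ec - (L.length : Int)) 1).map (fun _ => "")
     else if (L.length : Int) > ec then PySem.List.slice L none (some ec) else L)
    = (PySem.List.pyRange 0 ec 1).map
        (fun i => if i < (L.length : Int) then PySem.List.pyGetD L i "" else "") := by
  obtain ⟨n, rfl⟩ := Int.eq_ofNat_of_zero_le h
  have hB : (PySem.List.pyRange 0 (n : Int) 1).map
      (fun i => if i < (L.length : Int) then PySem.List.pyGetD L i "" else "")
      = L.take n ++ List.replicate (n - L.length) "" := by
    rw [PySem.List.pyRange_zero_natCast, List.map_map, ← range_getD]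
    apply List.map_congr_left
    intro k _
    by_cases hk : k < L.length
    · simp only [Function.comp, PySem.List.pyGetD_natCast]
      rw [if_pos (by exact_mod_cast hk)]
    · simp only [Function.comp]
      rw [if_neg (by exact_mod_cast hk), List.getD, List.getElem?_eq_none (by omega : L.length ≤ k)]
      rfl
  rw [hB]
  rcases lt_trichotomy (L.length : Int) (n : Int) with hlt | heq | hgt
  · rw [if_pos hlt]
    have h1 : (n : Int) - (L.length : Int) = ((n - L.length : Nat) : Int) := by omega
    rw [h1, PySem.List.pyRange_zero_natCast, List.map_map,
      List.take_of_length_le (by exact_mod_cast le_of_lt hlt)]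
    congr 1
    simp [Function.comp_def, List.map_const']
  · rw [if_neg (by omega), if_neg (by omega)]
    have h1 : L.length = n := by exact_mod_cast heq
    simp [h1, List.take_of_length_le (Nat.le_of_eq h1)]
  · rw [if_neg (by omega), if_pos hgt, PySem.List.slice_to _ (by omega)]
    have h1 : n - L.length = 0 := by omega
    simp [h1]

-- ===== VERDICT (by name: the statement is the Claim_ definition above) =====
theorem split_and_check_count_spec : Claim_equal_split_and_check_count := by
  intro s ec _ hpre
  unfold Spec_split_and_check_count split_and_check_count split_and_check_count_alt
  set d := PySem.Str.rstrip s with hd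
  -- A's raw split equals the reference split
  have hsplit : (PySem.Str.split? d ",").getD [] = (mySplit d.toList).map String.ofList := by
    have hc : ("," : String).toList = [','] := by decide
    simp [PySem.Str.split?, hc, PySem.Chars.split?, splitOn_comma]
  -- B's scan state glues back to the reference split
  have hscan := foldl_scan d.toList [] []
  have hid : (mySplit d.toList).modifyHead (fun x => [] ++ x) = mySplit d.toList := by
    cases mySplit d.toList with
    | nil => rfl
    | cons a t => simp
  rw [hid] at hscan
  simp only [List.nil_append] at hscan
  -- A's [:-1] drop yields exactly the fold's first component
  have hdrop : PySem.List.slice ((mySplit d.toList).map String.ofList) none (some (-1))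
      = (List.foldl (fun (st : List String × List Char) ch =>
          if ch = ',' then (st.1 ++ [String.ofList st.2], []) else (st.1, st.2 ++ [ch])) ([], []) d.toList).1 := by
    rw [← hscan]
    simp [PySem.List.slice]
  simp only [hsplit]
  by_cases he : PySem.Str.endswith d ","
  · simp only [if_pos he, hdrop]
    rw [adjust_eq _ _ hpre]
  · simp only [if_neg he, ← hscan]
    rw [adjust_eq _ _ hpre]
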